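-- pv_equiv track=rewrite | github.com/jimmy3018/event_extraction | graph_builder.py | _build_argument_argument_edges
-- ===== SOURCE A (Python) =====
-- from typing import List, Tuple, Dict, Any
--
-- def _build_argument_argument_edges(
--
--     argument_candidates: List[int],
--     max_dist: int = 2,
-- ) -> List[Tuple[int, int, str]]:
--     edges = []
--     for i in argument_candidates:
--         for j in argument_candidates:
--             if i == j:
--                 continue
--             if abs(i - j) <= max_dist:
--                 edges.append((i, j, "arg_support"))
--     return edges
-- ===== SOURCE B (Python) =====
-- from typing import List, Tuple
--
-- def _build_argument_argument_edges(
--     argument_candidates: List[int],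
--     max_dist: int = 2,
-- ) -> List[Tuple[int, int, str]]:
--     # Group positions by value, then slide a window over the sorted distinct
--     # values: the partners of a value v are the occurrences of values within
--     # max_dist of v, listed back in their original order.
--     positions = {}
--     for pos, value in enumerate(argument_candidates):
--         positions.setdefault(value, []).append(pos)
--     distinct = sorted(positions)
--     targets = {}
--     lo = hi = 0
--     for v in distinct:
--         while lo < len(distinct) and distinct[lo] < v - max_dist:
--             lo += 1
--         while hi < len(distinct) and distinct[hi] <= v + max_dist:
--             hi += 1
--         matches = [(p, w) for w in distinct[lo:hi] if w != v for p in positions[w]]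
--         matches.sort()
--         targets[v] = [w for _, w in matches]
--     return [(i, j, "arg_support") for i in argument_candidates for j in targets[i]]
-- ===== Notes on version B (the rewrite author's own statement) =====
-- stated objective: alternative
-- what changed: Replaces the quadratic all-pairs scan by grouping positions by value once, sliding a two-pointer window over the sorted distinct values, and emitting each value's partner list sorted back into original order.
import Mathlib
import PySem

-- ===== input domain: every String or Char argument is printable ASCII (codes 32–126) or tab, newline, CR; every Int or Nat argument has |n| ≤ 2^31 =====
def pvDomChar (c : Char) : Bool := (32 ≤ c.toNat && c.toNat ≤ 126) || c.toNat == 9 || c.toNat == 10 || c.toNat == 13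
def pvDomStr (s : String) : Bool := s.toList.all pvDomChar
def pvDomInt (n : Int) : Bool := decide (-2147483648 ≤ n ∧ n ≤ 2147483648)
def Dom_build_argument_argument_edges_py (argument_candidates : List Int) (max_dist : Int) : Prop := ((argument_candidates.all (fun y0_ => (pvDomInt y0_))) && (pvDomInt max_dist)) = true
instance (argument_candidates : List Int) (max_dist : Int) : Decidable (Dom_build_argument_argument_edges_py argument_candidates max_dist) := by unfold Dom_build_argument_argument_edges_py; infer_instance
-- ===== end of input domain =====

-- B replaces A's all-pairs double scan by grouping positions by value and sliding a
-- two-pointer window over the sorted distinct values (objective: alternative algorithm).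

-- ===== PORT A =====
def build_argument_argument_edges_py (argument_candidates : List Int) (max_dist : Int) : List (Int × Int × String) :=
  argument_candidates.foldl (fun edges i =>
    argument_candidates.foldl (fun edges j =>
      if i = j then edges
      else if |i - j| ≤ max_dist then edges ++ [(i, j, "arg_support")]
      else edges) edges) []

-- ===== PORT B =====
-- 'while k < len(V) and p(V[k]): k += 1' (the two pointer-advancing while loops of Source B)
def pvAdvance (V : List Int) (p : Int → Bool) (k : Nat) : Nat :=
  if h : k < V.length then
    (if p V[k] then pvAdvance V p (k + 1) else k)
  else k
termination_by V.length - k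

-- one iteration of Source B's 'for v in distinct' loop; state = (lo, hi, targets)
def pvStep (positions : PySem.Dict Int (List Int)) (V : List Int) (max_dist : Int)
    (st : Nat × Nat × PySem.Dict Int (List Int)) (v : Int) : Nat × Nat × PySem.Dict Int (List Int) :=
  let lo := pvAdvance V (fun u => decide (u < v - max_dist)) st.1
  let hi := pvAdvance V (fun u => decide (u ≤ v + max_dist)) st.2.1
  let ms := ((PySem.List.slice V (some (lo : Int)) (some (hi : Int))).filter
      (fun w => decide (¬ w = v))).flatMap
      -- positions[w]: the key w is always a key of positions, so Dict.getD is Python's positions[w]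
      (fun w => (positions.getD w []).map (fun p => (p, w)))
  let ms := PySem.List.sorted2 ms (fun m => m.1) (fun m => m.2)
  (lo, hi, st.2.2.insert v (ms.map (fun m => m.2)))

def build_argument_argument_edges_py_alt (argument_candidates : List Int) (max_dist : Int) : List (Int × Int × String) :=
  let positions := (PySem.List.enumerate argument_candidates).foldl
      (fun d e => d.modify e.2 [] (fun ps => ps ++ [e.1])) PySem.Dict.empty
  let distinct := PySem.List.sorted positions.keys (fun w => w)
  let final := distinct.foldl (pvStep positions distinct max_dist) (0, 0, PySem.Dict.empty)
  -- targets[i]: every candidate value is a key of targets, so Dict.getD is Python's targets[i]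
  argument_candidates.flatMap (fun i => (final.2.2.getD i []).map (fun j => (i, j, "arg_support")))

-- ===== PRECONDITION & SPEC =====
def Spec_build_argument_argument_edges_py (argument_candidates : List Int) (max_dist : Int) (out : List (Int × Int × String)) : Prop := out = build_argument_argument_edges_py_alt argument_candidates max_dist
instance (argument_candidates : List Int) (max_dist : Int) (out : List (Int × Int × String)) : Decidable (Spec_build_argument_argument_edges_py argument_candidates max_dist out) := by unfold Spec_build_argument_argument_edges_py; infer_instance

-- ===== CLAIM (what is proved, stated in full; the proofs are below) =====
def Claim_equal_build_argument_argument_edges_py : Prop := ∀ (argument_candidates : List Int) (max_dist : Int), Dom_build_argument_argument_edges_py argument_candidates max_dist → Spec_build_argument_argument_edges_py argument_candidates max_dist (build_argument_argument_edges_py argument_candidates max_dist)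

-- ===== LEMMAS AND PROOFS =====

-- canonical description of both programs: per source value v, the partners in list order
def pvTgt (xs : List Int) (d v : Int) : List Int :=
  xs.filter (fun j => decide (¬ v = j) && decide (|v - j| ≤ d))

def pvF (xs : List Int) (d v : Int) : List (Int × Int × String) :=
  (pvTgt xs d v).map (fun j => (v, j, "arg_support"))

-- ---- A-side ----
theorem pv_A_eq (xs : List Int) (d : Int) :
    build_argument_argument_edges_py xs d = xs.flatMap (pvF xs d) := by
  unfold build_argument_argument_edges_py
  have houter : (fun (edges : List (Int × Int × String)) i =>
      xs.foldl (fun edges j =>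
        if i = j then edges
        else if |i - j| ≤ d then edges ++ [(i, j, "arg_support")]
        else edges) edges)
      = fun edges i => edges ++ pvF xs d i := by
    funext edges i
    have hinner : (fun (edges : List (Int × Int × String)) j =>
        if i = j then edges
        else if |i - j| ≤ d then edges ++ [(i, j, "arg_support")]
        else edges)
        = fun edges j => if (decide (¬ i = j) && decide (|i - j| ≤ d)) = true
            then edges ++ [(i, j, "arg_support")] else edges := by
      funext edges j
      by_cases h1 : i = j <;> by_cases h2 : |i - j| ≤ d <;> simp [h1, h2]
    rw [hinner, PySem.List.foldl_append_if]
    rfl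
  rw [houter, PySem.List.foldl_append_eq_flatMap]
  simp

-- ---- B-side: the positions dict groups the enumeration by value ----
theorem pv_positions_getD (xs : List Int) (w : Int) :
    ((PySem.List.enumerate xs).foldl (fun d e => d.modify e.2 [] (fun ps => ps ++ [e.1]))
      PySem.Dict.empty).getD w []
    = ((PySem.List.enumerate xs).filter (fun e => e.2 == w)).map (fun e => e.1) := by
  have h := PySem.Dict.getD_foldl_modify_append
    ((PySem.List.enumerate xs).map (fun e => (e.2, e.1))) (PySem.Dict.empty (κ := Int) (ν := List Int)) w
  rw [List.foldl_map] at h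
  simpa [List.filter_map, List.map_map, Function.comp] using h

theorem pv_positions_keys (xs : List Int) :
    ((PySem.List.enumerate xs).foldl (fun d e => d.modify e.2 [] (fun ps => ps ++ [e.1]))
      PySem.Dict.empty).keys = PySem.Set.ofList xs := by
  have h := PySem.Dict.keys_foldl_modify_key (PySem.List.enumerate xs) (fun e => e.2) []
    (fun d e ps => ps ++ [e.1]) PySem.Dict.empty
  rw [h, PySem.List.map_snd_enumerate]
  rfl

-- ---- B-side: counting in a sorted list ----
theorem pv_sorted_le_getElem (V : List Int) (hV : V.Pairwise (· ≤ ·)) {i j : Nat}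
    (hij : i ≤ j) (hj : j < V.length) : V[i]'(lt_of_le_of_lt hij hj) ≤ V[j] := by
  rcases Nat.lt_or_ge i j with h | h
  · exact (List.pairwise_iff_getElem.mp hV) i j _ hj h
  · have : i = j := le_antisymm hij h
    subst this; rfl

theorem pv_countP_ge (V : List Int) (p : Int → Bool) (hV : V.Pairwise (· ≤ ·))
    (hmono : ∀ a b : Int, a ≤ b → p b = true → p a = true) (k : Nat) (hk : k < V.length)
    (hp : p V[k] = true) : k + 1 ≤ V.countP p := by
  have hsplit : V.countP p = (V.take (k+1)).countP p + (V.drop (k+1)).countP p := by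
    rw [← List.countP_append, List.take_append_drop]
  have hall : ∀ a ∈ V.take (k+1), p a = true := by
    intro a ha
    obtain ⟨i, hi, rfl⟩ := List.mem_iff_getElem.mp ha
    have hilen : i < V.length := lt_of_lt_of_le hi (by simpa using List.length_take_le (k+1) V)
    rw [List.getElem_take]
    have hik : i ≤ k := by
      have := hi; simp [List.length_take] at this; omega
    exact hmono _ _ (pv_sorted_le_getElem V hV hik hk) hp
  have : (V.take (k+1)).countP p = (V.take (k+1)).length := List.countP_eq_length.mpr hall
  have hlen : (V.take (k+1)).length = k + 1 := by simp [List.length_take]; omega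
  omega

theorem pv_countP_le (V : List Int) (p : Int → Bool) (hV : V.Pairwise (· ≤ ·))
    (hmono : ∀ a b : Int, a ≤ b → p b = true → p a = true) (k : Nat) (hk : k < V.length)
    (hp : p V[k] = false) : V.countP p ≤ k := by
  have hsplit : V.countP p = (V.take k).countP p + (V.drop k).countP p := by
    rw [← List.countP_append, List.take_append_drop]
  have hzero : (V.drop k).countP p = 0 := by
    rw [List.countP_eq_zero]
    intro a ha
    obtain ⟨i, hi, rfl⟩ := List.mem_iff_getElem.mp ha
    rw [List.getElem_drop]
    intro hcon
    have hki : k + i < V.length := by simp [List.length_drop] at hi; omega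
    have := hmono _ _ (pv_sorted_le_getElem V hV (Nat.le_add_right k i) hki) hcon
    rw [hp] at this; exact Bool.false_ne_true this
  have h1 : (V.take k).countP p ≤ k := le_trans List.countP_le_length (by simp)
  omega

theorem pv_advance_eq (V : List Int) (p : Int → Bool) (hV : V.Pairwise (· ≤ ·))
    (hmono : ∀ a b : Int, a ≤ b → p b = true → p a = true) :
    ∀ (n k : Nat), V.length - k ≤ n → k ≤ V.countP p → pvAdvance V p k = V.countP p := by
  intro n
  induction n with
  | zero =>
    intro k hn hk
    have hlen : V.length ≤ k := by omega
    have : V.countP p ≤ V.length := List.countP_le_length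
    rw [pvAdvance]
    simp [Nat.not_lt.mpr hlen]
    omega
  | succ n ih =>
    intro k hn hk
    by_cases h : k < V.length
    · by_cases h2 : p V[k] = true
      · have : k + 1 ≤ V.countP p := pv_countP_ge V p hV hmono k h h2
        rw [pvAdvance]
        simp [h, h2]
        exact ih (k+1) (by omega) this
      · have : V.countP p ≤ k := pv_countP_le V p hV hmono k h (by simpa using h2)
        rw [pvAdvance]
        simp [h, h2]
        omega
    · rw [pvAdvance]
      simp [h]
      have : V.countP p ≤ V.length := List.countP_le_length
      omega

-- the slice between the two counters is exactly the value window
theorem pv_window (a b : Int) : ∀ (V : List Int), V.Pairwise (· ≤ ·) →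
    List.take (V.countP (fun u => decide (u ≤ b)) - V.countP (fun u => decide (u < a)))
      (List.drop (V.countP (fun u => decide (u < a))) V)
    = V.filter (fun w => decide (a ≤ w) && decide (w ≤ b)) := by
  intro V
  induction V with
  | nil => simp
  | cons h t ih =>
    intro hV
    have hht : ∀ w ∈ t, h ≤ w := fun w hw => (List.pairwise_cons.mp hV).1 w hw
    have ht : t.Pairwise (· ≤ ·) := (List.pairwise_cons.mp hV).2
    have ihh := ih ht
    simp only [List.countP_cons, List.filter_cons]
    by_cases h1 : h < a
    · have ha : ¬ a ≤ h := not_le.mpr h1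
      by_cases h2 : h ≤ b
      · simp only [h1, h2, ha, decide_true, decide_false, if_true,
          Bool.false_and, Bool.if_false_right]
        rw [List.drop_succ_cons, Nat.add_sub_add_right]
        exact ihh
      · have hz2 : t.countP (fun u => decide (u ≤ b)) = 0 := by
          rw [List.countP_eq_zero]
          intro w hw
          have := hht w hw
          simp only [decide_eq_true_eq]
          omega
        have hzf : t.filter (fun w => decide (a ≤ w) && decide (w ≤ b)) = [] := by
          rw [List.filter_eq_nil_iff]
          intro w hw
          have := hht w hw
          simp only [Bool.and_eq_true, decide_eq_true_eq, not_and]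
          omega
        simp [h1, h2, ha, hz2, hzf]
    · have ha : a ≤ h := not_lt.mp h1
      have hz1 : t.countP (fun u => decide (u < a)) = 0 := by
        rw [List.countP_eq_zero]
        intro w hw
        have := hht w hw
        simp only [decide_eq_true_eq]
        omega
      by_cases h2 : h ≤ b
      · rw [hz1] at ihh
        simp only [Nat.sub_zero, List.drop_zero] at ihh
        simp [h1, h2, ha, hz1, List.take_succ_cons, ihh]
      · have hz2 : t.countP (fun u => decide (u ≤ b)) = 0 := by
          rw [List.countP_eq_zero]
          intro w hw
          have := hht w hw
          simp only [decide_eq_true_eq]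
          omega
        have hzf : t.filter (fun w => decide (a ≤ w) && decide (w ≤ b)) = [] := by
          rw [List.filter_eq_nil_iff]
          intro w hw
          have := hht w hw
          simp only [Bool.and_eq_true, decide_eq_true_eq, not_and]
          omega
        simp [h1, h2, ha, hz1, hz2, hzf]

-- ---- B-side: the grouped matches are a permutation of the filtered enumeration ----
theorem pv_filter_or_perm {β : Type} (k : β → Int) (w : Int) (ws : List Int) (hw : w ∉ ws) :
    ∀ (l : List β), (l.filter (fun e => decide (k e ∈ w :: ws))).Perm
      (l.filter (fun e => k e == w) ++ l.filter (fun e => decide (k e ∈ ws))) := by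
  intro l
  induction l with
  | nil => simp
  | cons e t ih =>
    by_cases h1 : k e = w
    · have h2 : k e ∉ ws := h1 ▸ hw
      have e1 : decide (k e ∈ w :: ws) = true := by simp [h1]
      have e2 : (k e == w) = true := by simp [h1]
      have e3 : decide (k e ∈ ws) = false := by simp [h2]
      rw [List.filter_cons, List.filter_cons, List.filter_cons, e1, e2, e3]
      simpa using ih.cons e
    · by_cases h2 : k e ∈ ws
      · have e1 : decide (k e ∈ w :: ws) = true := by simp [h2]
        have e2 : (k e == w) = false := by simp [h1]
        have e3 : decide (k e ∈ ws) = true := by simp [h2]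
        rw [List.filter_cons, List.filter_cons, List.filter_cons, e1, e2, e3]
        simp only [if_pos rfl, Bool.false_eq_true, if_false]
        exact (ih.cons e).trans (List.perm_middle).symm
      · have e1 : decide (k e ∈ w :: ws) = false := by simp [h1, h2]
        have e2 : (k e == w) = false := by simp [h1]
        have e3 : decide (k e ∈ ws) = false := by simp [h2]
        rw [List.filter_cons, List.filter_cons, List.filter_cons, e1, e2, e3]
        simpa using ih

theorem pv_flatMap_perm {β : Type} (k : β → Int) (l : List β) :
    ∀ (ws : List Int), ws.Nodup →
    (ws.flatMap (fun w => l.filter (fun e => k e == w))).Perm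
      (l.filter (fun e => decide (k e ∈ ws))) := by
  intro ws
  induction ws with
  | nil => simp
  | cons w ws ih =>
    intro hnd
    have hw : w ∉ ws := (List.nodup_cons.mp hnd).1
    have hnd' : ws.Nodup := (List.nodup_cons.mp hnd).2
    rw [List.flatMap_cons]
    exact ((ih hnd').append_left _).trans (pv_filter_or_perm k w ws hw l).symm

-- ---- B-side: sorting pairs whose first components are pairwise distinct ----
theorem pv_insertBy_congr {α : Type} (b1 b2 : α → α → Bool) (x : α) :
    ∀ (ys : List α), (∀ y ∈ ys, b1 x y = b2 x y) →
      PySem.List.insertBy b1 x ys = PySem.List.insertBy b2 x ys := by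
  intro ys
  induction ys with
  | nil => intro _; rfl
  | cons y t ih =>
    intro h
    have hy := h y (by simp)
    simp only [PySem.List.insertBy, hy]
    by_cases h2 : b2 x y = true
    · simp [h2]
    · simp only [h2, if_false, Bool.false_eq_true]
      rw [ih (fun z hz => h z (by simp [hz]))]

theorem pv_foldl_insertBy_congr {α : Type} (S : List α) (b1 b2 : α → α → Bool)
    (h : ∀ x ∈ S, ∀ y ∈ S, b1 x y = b2 x y) :
    ∀ (xs acc : List α), (∀ x ∈ xs, x ∈ S) → (∀ y ∈ acc, y ∈ S) →
    xs.foldl (fun acc x => PySem.List.insertBy b1 x acc) acc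
      = xs.foldl (fun acc x => PySem.List.insertBy b2 x acc) acc := by
  intro xs
  induction xs with
  | nil => intro acc _ _; rfl
  | cons x t ih =>
    intro acc hxs hacc
    have hx : x ∈ S := hxs x (by simp)
    have heq : PySem.List.insertBy b1 x acc = PySem.List.insertBy b2 x acc :=
      pv_insertBy_congr b1 b2 x acc (fun y hy => h x hx y (hacc y hy))
    simp only [List.foldl_cons, heq]
    exact ih (PySem.List.insertBy b2 x acc) (fun a ha => hxs a (by simp [ha]))
      (fun y hy => by
        rcases (PySem.List.mem_insertBy b2 x y acc).mp hy with rfl | hy'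
        · exact hx
        · exact hacc y hy')

theorem pv_sorted2_eq_sorted_fst (ms : List (Int × Int))
    (hinj : ∀ x ∈ ms, ∀ y ∈ ms, x.1 = y.1 → x = y) :
    PySem.List.sorted2 ms (fun m => m.1) (fun m => m.2)
      = PySem.List.sorted ms (fun m => m.1) := by
  rw [PySem.List.sorted_eq_foldl_insertBy]
  show ms.foldl (fun acc x => PySem.List.insertBy
      (fun a b => decide (a.1 < b.1) || (!decide (b.1 < a.1) && decide (a.2 < b.2))) x acc) []
    = ms.foldl (fun acc x => PySem.List.insertBy (fun a b => decide (a.1 < b.1)) x acc) []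
  apply pv_foldl_insertBy_congr ms _ _ ?_ ms [] (fun _ h => h) (by simp)
  intro x hx y hy
  by_cases h1 : x.1 < y.1
  · simp [h1]
  · by_cases h2 : y.1 < x.1
    · simp [h1, h2]
    · have hxy : x = y := hinj x hx y hy (by omega)
      subst hxy
      simp [h1]

-- ---- B-side: one loop iteration produces the canonical partner list ----
theorem pv_step_tgt (xs : List Int) (d : Int) (P : PySem.Dict Int (List Int)) (V : List Int)
    (hP : ∀ w, P.getD w [] = ((PySem.List.enumerate xs).filter (fun e => e.2 == w)).map (fun e => e.1))
    (hV : V.Pairwise (· < ·)) (hVmem : ∀ w : Int, w ∈ V ↔ w ∈ xs) (v : Int) :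
    ((PySem.List.sorted2
      (((PySem.List.slice V (some ((V.countP (fun u => decide (u < v - d)) : Nat) : Int))
          (some ((V.countP (fun u => decide (u ≤ v + d)) : Nat) : Int))).filter
          (fun w => decide (¬ w = v))).flatMap
        (fun w => (P.getD w []).map (fun p => (p, w))))
      (fun m => m.1) (fun m => m.2)).map (fun m => m.2)) = pvTgt xs d v := by
  have hVle : V.Pairwise (· ≤ ·) := hV.imp (fun h => le_of_lt h)
  have hVnd : V.Nodup := hV.imp (fun h => ne_of_lt h)
  set l := PySem.List.enumerate xs with hl
  rw [PySem.List.slice_natCast, pv_window (v - d) (v + d) V hVle]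
  set ws := (V.filter (fun w => decide (v - d ≤ w) && decide (w ≤ v + d))).filter
      (fun w => decide (¬ w = v)) with hws
  have hwsnd : ws.Nodup := (hVnd.filter _).filter _
  have hwsmem : ∀ w : Int, w ∈ ws ↔ (w ∈ V ∧ v - d ≤ w ∧ w ≤ v + d ∧ ¬ w = v) := by
    intro w
    simp only [hws, List.mem_filter, Bool.and_eq_true, decide_eq_true_eq]
    tauto
  have hgrp : ∀ w : Int, (P.getD w []).map (fun p => (p, w)) = l.filter (fun e => e.2 == w) := by
    intro w
    rw [hP w, List.map_map]
    apply List.map_congr_left ?_ |>.trans (List.map_id _)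
    intro e he
    have h2 : e.2 = w := by simpa using (List.mem_filter.mp he).2
    simp only [Function.comp, ← h2, id_eq]
  have hfm : (ws.flatMap (fun w => (P.getD w []).map (fun p => (p, w))))
      = ws.flatMap (fun w => l.filter (fun e => e.2 == w)) :=
    List.flatMap_congr (fun w _ => hgrp w)
  rw [hfm]
  set ms0 := ws.flatMap (fun w => l.filter (fun e => e.2 == w)) with hms0
  have hperm : ms0.Perm (l.filter (fun e => decide (e.2 ∈ ws))) :=
    pv_flatMap_perm (fun e => e.2) l ws hwsnd
  have habs : ∀ j : Int, (|v - j| ≤ d) ↔ (v - d ≤ j ∧ j ≤ v + d) := by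
    intro j
    rw [abs_le]
    omega
  have hE : l.filter (fun e => decide (e.2 ∈ ws))
      = l.filter (fun e => decide (¬ v = e.2) && decide (|v - e.2| ≤ d)) := by
    apply List.filter_congr
    intro e he
    have hex : e.2 ∈ xs := by
      obtain ⟨k, hk, rfl⟩ := (PySem.List.mem_enumerate_iff xs 0 e).mp he
      exact List.getElem_mem _
    have heV : e.2 ∈ V := (hVmem e.2).mpr hex
    rw [Bool.eq_iff_iff]
    simp only [decide_eq_true_eq, Bool.and_eq_true, hwsmem]
    constructor
    · rintro ⟨_, h1, h2, h3⟩
      exact ⟨fun h => h3 h.symm, (habs e.2).mpr ⟨h1, h2⟩⟩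
    · rintro ⟨h3, h12⟩
      have := (habs e.2).mp h12
      exact ⟨heV, this.1, this.2, fun h => h3 h.symm⟩
  rw [hE] at hperm
  set E := l.filter (fun e => decide (¬ v = e.2) && decide (|v - e.2| ≤ d)) with hEdef
  have hEpw : E.Pairwise (fun p q => p.1 < q.1) :=
    List.Pairwise.sublist List.filter_sublist (PySem.List.pairwise_lt_enumerate xs 0)
  have hmapnd : (E.map (fun m => m.1)).Nodup :=
    ((List.pairwise_map.mpr hEpw).imp (fun h => ne_of_lt h))
  have hinj : ∀ x ∈ ms0, ∀ y ∈ ms0, x.1 = y.1 → x = y := by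
    intro x hx y hy hxy
    exact List.inj_on_of_nodup_map hmapnd (hperm.mem_iff.mp hx) (hperm.mem_iff.mp hy) hxy
  rw [pv_sorted2_eq_sorted_fst ms0 hinj,
    PySem.List.sorted_eq_of_perm_of_pairwise_lt ms0 E (fun m => m.1) hperm.symm hEpw]
  have : E.map (fun m => m.2)
      = (l.map (fun e => e.2)).filter (fun j => decide (¬ v = j) && decide (|v - j| ≤ d)) := by
    rw [List.filter_map]
    rfl
  rw [this, hl, PySem.List.map_snd_enumerate]
  rfl

-- ---- B-side: the whole loop over the sorted distinct values ----
theorem pv_loop (xs : List Int) (d : Int) (P : PySem.Dict Int (List Int)) (V : List Int)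
    (hP : ∀ w, P.getD w [] = ((PySem.List.enumerate xs).filter (fun e => e.2 == w)).map (fun e => e.1))
    (hV : V.Pairwise (· < ·)) (hVmem : ∀ w : Int, w ∈ V ↔ w ∈ xs) :
    ∀ (W : List Int) (lo hi : Nat) (T : PySem.Dict Int (List Int)),
      W.Pairwise (· < ·) →
      (∀ w ∈ W, lo ≤ V.countP (fun u => decide (u < w - d)) ∧
                hi ≤ V.countP (fun u => decide (u ≤ w + d))) →
      ∀ v : Int, ((W.foldl (pvStep P V d) (lo, hi, T)).2.2).get? v
        = if v ∈ W then some (pvTgt xs d v) else T.get? v := by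
  have hVle : V.Pairwise (· ≤ ·) := hV.imp (fun h => le_of_lt h)
  intro W
  induction W with
  | nil => intro lo hi T _ _ v; simp
  | cons w W' ih =>
    intro lo hi T hpw hbnd v
    have hw := hbnd w (by simp)
    have hlo : pvAdvance V (fun u => decide (u < w - d)) lo
        = V.countP (fun u => decide (u < w - d)) :=
      pv_advance_eq V _ hVle (by intro a b hab h; simp at h ⊢; omega) V.length lo
        (by omega) hw.1
    have hhi : pvAdvance V (fun u => decide (u ≤ w + d)) hi
        = V.countP (fun u => decide (u ≤ w + d)) :=
      pv_advance_eq V _ hVle (by intro a b hab h; simp at h ⊢; omega) V.length hi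
        (by omega) hw.2
    have hstep : pvStep P V d (lo, hi, T) w
        = (V.countP (fun u => decide (u < w - d)), V.countP (fun u => decide (u ≤ w + d)),
           T.insert w (pvTgt xs d w)) := by
      show (pvAdvance V (fun u => decide (u < w - d)) lo, pvAdvance V (fun u => decide (u ≤ w + d)) hi, _) = _
      rw [hlo, hhi]
      rw [pv_step_tgt xs d P V hP hV hVmem w]
    rw [List.foldl_cons, hstep]
    have hwlt : ∀ u ∈ W', w < u := (List.pairwise_cons.mp hpw).1
    have hpw' : W'.Pairwise (· < ·) := (List.pairwise_cons.mp hpw).2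
    have hbnd' : ∀ u ∈ W', V.countP (fun x => decide (x < w - d)) ≤ V.countP (fun x => decide (x < u - d)) ∧
        V.countP (fun x => decide (x ≤ w + d)) ≤ V.countP (fun x => decide (x ≤ u + d)) := by
      intro u hu
      have hwu := hwlt u hu
      constructor
      · exact List.countP_mono_left (by intro x _ hx; simp at hx ⊢; omega)
      · exact List.countP_mono_left (by intro x _ hx; simp at hx ⊢; omega)
    rw [ih _ _ _ hpw' hbnd' v]
    by_cases hv : v ∈ W'
    · simp [hv, List.mem_cons]
    · by_cases hvw : v = w
      · subst hvw
        simp [hv, PySem.Dict.get?_insert_self]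
      · simp only [List.mem_cons, hv, hvw, or_self, if_false]
        exact PySem.Dict.get?_insert_of_ne T _ hvw

theorem pv_B_eq (xs : List Int) (d : Int) :
    build_argument_argument_edges_py_alt xs d = xs.flatMap (pvF xs d) := by
  unfold build_argument_argument_edges_py_alt
  set P := (PySem.List.enumerate xs).foldl
      (fun d e => d.modify e.2 [] (fun ps => ps ++ [e.1])) PySem.Dict.empty with hPdef
  set V := PySem.List.sorted P.keys (fun w => w) with hVdef
  have hP : ∀ w, P.getD w [] = ((PySem.List.enumerate xs).filter (fun e => e.2 == w)).map (fun e => e.1) :=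
    fun w => pv_positions_getD xs w
  have hkeys : P.keys = PySem.Set.ofList xs := pv_positions_keys xs
  have hV : V.Pairwise (· < ·) := by
    rw [hVdef, hkeys]
    exact PySem.List.sorted_ofList_pairwise_lt xs
  have hVmem : ∀ w : Int, w ∈ V ↔ w ∈ xs := by
    intro w
    rw [hVdef, PySem.List.mem_sorted, hkeys, PySem.Set.mem_ofList]
  have hT := pv_loop xs d P V hP hV hVmem V 0 0 PySem.Dict.empty hV
    (fun w _ => ⟨Nat.zero_le _, Nat.zero_le _⟩)
  apply List.flatMap_congr
  intro i hi
  rw [PySem.Dict.getD, hT i, if_pos ((hVmem i).mpr hi)]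
  rfl

-- ===== VERDICT (by name: the statement is the Claim_ definition above) =====
theorem build_argument_argument_edges_py_spec : Claim_equal_build_argument_argument_edges_py := by
  intro xs d _
  unfold Spec_build_argument_argument_edges_py
  rw [pv_A_eq, pv_B_eq]
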